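-- pv_equiv track=rewrite | github.com/gsaravanan1/atl | find-all-anagrams-in-a-string.py | find_anagram_no_counter
-- ===== SOURCE A (Python) =====
-- def find_anagram_no_counter(words, string):
--     def is_anagram(word, string):
--         char_count = {}
--         for char in word:
--             char_count[char] = char_count.get(char, 0) + 1
--
--         for char in string:
--             if char in char_count:
--                 char_count[char] -= 1
--                 if char_count[char] == 0:
--                     del char_count[char]
--
--         return len(char_count) == 0
--
--     for word in words:
--         if is_anagram(word, string):
--             return word
--
--     return None
-- ===== SOURCE B (Python) =====
-- def find_anagram_no_counter(words, string):
--     string_count = {}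
--     for char in string:
--         string_count[char] = string_count.get(char, 0) + 1
--
--     for word in words:
--         word_count = {}
--         for char in word:
--             word_count[char] = word_count.get(char, 0) + 1
--         if all(n <= string_count.get(c, 0) for c, n in word_count.items()):
--             return word
--
--     return None
-- ===== Notes on version B (the rewrite author's own statement) =====
-- stated objective: faster
-- what changed: B counts the characters of `string` once before the word loop and accepts a word when its own character counts are pointwise <= that precomputed table, replacing A's per-word decrement-and-delete rescan of `string`.
import Mathlib
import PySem

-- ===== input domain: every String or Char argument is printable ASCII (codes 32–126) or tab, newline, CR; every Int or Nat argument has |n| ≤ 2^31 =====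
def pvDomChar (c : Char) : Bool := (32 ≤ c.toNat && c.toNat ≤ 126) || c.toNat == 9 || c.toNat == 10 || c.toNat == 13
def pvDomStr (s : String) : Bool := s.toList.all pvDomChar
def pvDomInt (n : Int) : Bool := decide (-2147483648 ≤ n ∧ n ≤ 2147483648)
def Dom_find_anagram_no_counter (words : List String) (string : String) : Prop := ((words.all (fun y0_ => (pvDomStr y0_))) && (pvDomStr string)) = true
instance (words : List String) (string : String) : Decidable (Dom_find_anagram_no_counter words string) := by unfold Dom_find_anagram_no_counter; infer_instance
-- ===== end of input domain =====

-- B hoists the character count of `string` out of the word loop and tests each word by a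
-- pointwise <= comparison of count tables, instead of A's per-word decrement-and-delete
-- rescan of `string`; objective: faster (string is counted once, not once per word).

-- ===== PORT A =====
-- one iteration of A's `for char in string` decrement-and-delete loop
def pvAStep (d : PySem.Dict Char Int) (ch : Char) : PySem.Dict Char Int :=
  if d.contains ch then
    let d1 := d.insert ch (d.getD ch 0 - 1)   -- char_count[char] -= 1
    if d1.getD ch 0 == 0 then d1.erase ch else d1
  else d

-- A's inner helper is_anagram(word, string)
def pvIsAnagram (word : List Char) (string : List Char) : Bool :=
  let cc := word.foldl (fun d ch => d.insert ch (d.getD ch 0 + 1))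
              (PySem.Dict.empty : PySem.Dict Char Int)
  let cc := string.foldl pvAStep cc
  cc.size == 0

def find_anagram_no_counter (words : List String) (string : String) : Option String :=
  match words with
  | [] => none
  | w :: ws =>
    if pvIsAnagram w.toList string.toList then some w
    else find_anagram_no_counter ws string

-- ===== PORT B =====
-- B's word loop, with the precomputed count table of `string` passed in
def pvFindLoopB (words : List String) (sc : PySem.Dict Char Int) : Option String :=
  match words with
  | [] => none
  | w :: ws =>
    let wc := w.toList.foldl (fun d ch => d.insert ch (d.getD ch 0 + 1))
                (PySem.Dict.empty : PySem.Dict Char Int)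
    if wc.items.all (fun p => decide (p.2 ≤ sc.getD p.1 0)) then some w
    else pvFindLoopB ws sc

def find_anagram_no_counter_alt (words : List String) (string : String) : Option String :=
  let sc := string.toList.foldl (fun d ch => d.insert ch (d.getD ch 0 + 1))
              (PySem.Dict.empty : PySem.Dict Char Int)
  pvFindLoopB words sc

-- ===== PRECONDITION & SPEC =====
def Spec_find_anagram_no_counter (words : List String) (string : String) (out : Option String) : Prop := out = find_anagram_no_counter_alt words string
instance (words : List String) (string : String) (out : Option String) : Decidable (Spec_find_anagram_no_counter words string out) := by unfold Spec_find_anagram_no_counter; infer_instance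

-- ===== CLAIM (what is proved, stated in full; the proofs are below) =====
def Claim_equal_find_anagram_no_counter : Prop := ∀ (words : List String) (string : String), Dom_find_anagram_no_counter words string → Spec_find_anagram_no_counter words string (find_anagram_no_counter words string)

-- ===== LEMMAS AND PROOFS =====

-- get? via contains/getD (no such lemma in the prelude)
lemma pv_get?_eq (d : PySem.Dict Char Int) (c : Char) :
    d.get? c = if d.contains c then some (d.getD c 0) else none := by
  rw [PySem.Dict.contains_eq_isSome_get?, PySem.Dict.getD_eq_get?_getD]
  cases h : d.get? c <;> simp

-- lookup after erase (no such lemma in the prelude)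
lemma pv_find?_filter_ne (t : List (Char × Int)) (k k' : Char) :
    (t.filter (fun p => !(p.1 == k))).find? (fun p => p.1 == k')
      = if k' = k then none else t.find? (fun p => p.1 == k') := by
  induction t with
  | nil => simp
  | cons p t ih =>
    by_cases hpk : p.1 = k
    · by_cases hk : k' = k
      · simp [hpk, hk, ih]
      · have hpk' : ¬ p.1 = k' := by rw [hpk]; exact fun h => hk h.symm
        simp [List.filter_cons, List.find?_cons, hpk, hpk', hk, ih, Ne.symm hk]
    · by_cases hpk' : p.1 = k'
      · have hk : ¬ k' = k := fun h => hpk (by rw [hpk', h])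
        simp [hpk, hpk', hk]
      · by_cases hk : k' = k <;> simp [hpk, hpk', hk, ih]

lemma pv_get?_erase (d : PySem.Dict Char Int) (k k' : Char) :
    (d.erase k).get? k' = if k' = k then none else d.get? k' := by
  obtain ⟨items⟩ := d
  simp only [PySem.Dict.erase, PySem.Dict.get?, pv_find?_filter_ne]
  by_cases hk : k' = k <;> simp [hk]

-- len(d) == 0 iff every lookup misses
lemma pv_size_zero (d : PySem.Dict Char Int) :
    (d.size == 0) = true ↔ ∀ c, d.get? c = none := by
  obtain ⟨items⟩ := d
  cases items with
  | nil => simp [PySem.Dict.size, PySem.Dict.get?]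
  | cons p t =>
    simp only [PySem.Dict.size]
    constructor
    · intro h; simp at h
    · intro h
      have := h p.1
      simp [PySem.Dict.get?] at this

-- lookup in Counter(xs)
lemma pv_get?_counter (xs : List Char) (c : Char) :
    (PySem.Dict.counter xs).get? c
      = if 0 < ((xs.count c : Nat) : Int) then some ((xs.count c : Nat) : Int) else none := by
  rw [pv_get?_eq, PySem.Dict.contains_counter, PySem.Dict.getD_counter]
  by_cases hm : c ∈ xs
  · have : 0 < xs.count c := List.count_pos_iff.mpr hm
    simp [hm, this]
  · have : xs.count c = 0 := List.count_eq_zero.mpr hm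
    simp [hm, this]

-- invariant of A's decrement-and-delete loop
lemma pv_aloop (s : List Char) : ∀ (g : Char → Int) (d : PySem.Dict Char Int),
    (∀ c, d.get? c = if 0 < g c then some (g c) else none) →
    ∀ c, (s.foldl pvAStep d).get? c
      = if 0 < g c - ((s.count c : Nat) : Int) then some (g c - ((s.count c : Nat) : Int)) else none := by
  induction s with
  | nil => intro g d h c; simpa using h c
  | cons ch rest ih =>
    intro g d h c
    simp only [List.foldl_cons]
    have h' : ∀ c', (pvAStep d ch).get? c'
        = if 0 < (if c' = ch then g c' - 1 else g c')
          then some (if c' = ch then g c' - 1 else g c') else none := by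
      intro c'
      unfold pvAStep
      by_cases hc : d.contains ch
      · have hget : d.get? ch = some (g ch) := by
          have := h ch
          rw [pv_get?_eq, if_pos hc] at this ⊢
          by_cases hg : 0 < g ch
          · simpa [hg] using this
          · simp [hg] at this
        have hpos : 0 < g ch := by
          have := h ch
          rw [hget] at this
          by_cases hg : 0 < g ch
          · exact hg
          · simp [hg] at this
        have hgd : d.getD ch 0 = g ch := by
          rw [PySem.Dict.getD_eq_get?_getD, hget]; rfl
        have hgd1 : (d.insert ch (d.getD ch 0 - 1)).getD ch 0 = g ch - 1 := by
          rw [PySem.Dict.getD_eq_get?_getD, PySem.Dict.get?_insert, if_pos rfl, hgd]; rfl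
        simp only [if_pos hc, hgd, hgd1]
        by_cases hz : g ch - 1 = 0
        · rw [if_pos (by simpa using hz), pv_get?_erase]
          by_cases hcc : c' = ch
          · simp [hcc, hz]
          · simp [PySem.Dict.get?_insert, hcc, h c']
        · rw [if_neg (by simpa using hz), PySem.Dict.get?_insert]
          by_cases hcc : c' = ch
          · subst hcc
            have h1 : 0 < g c' - 1 := by omega
            simp [h1]
            omega
          · simp [hcc, h c']
      · simp only [if_neg hc]
        by_cases hcc : c' = ch
        · have hnone : d.get? ch = none := by
            rw [pv_get?_eq, if_neg hc]
          have hng : ¬ 0 < g ch := by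
            intro hg
            have := h ch
            rw [hnone, if_pos hg] at this
            simp at this
          have : ¬ 0 < g ch - 1 := by omega
          simp [hcc, this, hnone]
          omega
        · simp [hcc, h c']
    have hrec := ih (fun c' => if c' = ch then g c' - 1 else g c') (pvAStep d ch) h' c
    rw [hrec]
    by_cases hcc : c = ch
    · subst hcc
      have hcnt : g c - 1 - ((rest.count c : Nat) : Int)
          = g c - (((c :: rest).count c : Nat) : Int) := by
        simp only [List.count_cons, beq_self_eq_true, if_pos]
        push_cast
        ring
      simp only [eq_self_iff_true, if_true, hcnt]
    · have hcnt : ((rest.count c : Nat) : Int) = (((ch :: rest).count c : Nat) : Int) := by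
        simp [Ne.symm hcc]
      simp only [if_neg hcc, hcnt]

-- is_anagram(word, string) coincides with B's pointwise <= test
lemma pv_word (w s : List Char) :
    pvIsAnagram w s
      = (PySem.Dict.counter w).items.all
          (fun p => decide (p.2 ≤ (PySem.Dict.counter s).getD p.1 0)) := by
  rw [Bool.eq_iff_iff]
  constructor
  · intro hA
    unfold pvIsAnagram at hA
    rw [PySem.Dict.foldl_insert_getD_add_one_eq_counter] at hA
    have hall := (pv_size_zero _).mp hA
    simp only [List.all_eq_true]
    intro p hp
    rw [PySem.Dict.items_counter] at hp
    obtain ⟨k, hk, rfl⟩ := List.mem_map.mp hp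
    have := hall k
    rw [pv_aloop s (fun c => ((w.count c : Nat) : Int)) (PySem.Dict.counter w)
      (fun c => pv_get?_counter w c) k] at this
    rw [PySem.Dict.getD_counter]
    by_cases hlt : 0 < ((w.count k : Nat) : Int) - ((s.count k : Nat) : Int)
    · rw [if_pos hlt] at this; exact absurd this (by simp)
    · simp only [decide_eq_true_eq]; omega
  · intro hB
    unfold pvIsAnagram
    rw [PySem.Dict.foldl_insert_getD_add_one_eq_counter]
    rw [pv_size_zero]
    intro c
    rw [pv_aloop s (fun c => ((w.count c : Nat) : Int)) (PySem.Dict.counter w)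
      (fun c => pv_get?_counter w c) c]
    by_cases hm : c ∈ w
    · have hp : (c, ((w.count c : Nat) : Int)) ∈ (PySem.Dict.counter w).items := by
        rw [PySem.Dict.items_counter]
        exact List.mem_map.mpr ⟨c, (PySem.Set.mem_ofList w c).mpr hm, rfl⟩
      have hle := List.all_eq_true.mp hB _ hp
      rw [PySem.Dict.getD_counter] at hle
      simp only [decide_eq_true_eq] at hle
      have hnp : ¬ 0 < ((w.count c : Nat) : Int) - ((s.count c : Nat) : Int) := by omega
      simp
      omega
    · have : w.count c = 0 := List.count_eq_zero.mpr hm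
      simp [this]

-- the two outer word loops agree
lemma pv_main (words : List String) (string : String) :
    find_anagram_no_counter words string
      = pvFindLoopB words
          (string.toList.foldl (fun d ch => d.insert ch (d.getD ch 0 + 1)) PySem.Dict.empty) := by
  induction words with
  | nil => rfl
  | cons w ws ih =>
    show (if pvIsAnagram w.toList string.toList then some w else find_anagram_no_counter ws string) = _
    rw [pv_word, ih]
    simp only [pvFindLoopB, PySem.Dict.foldl_insert_getD_add_one_eq_counter]
    rfl

-- ===== VERDICT (by name: the statement is the Claim_ definition above) =====
theorem find_anagram_no_counter_spec : Claim_equal_find_anagram_no_counter := by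
  intro words string _
  unfold Spec_find_anagram_no_counter find_anagram_no_counter_alt
  exact pv_main words string
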